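-- pv_equiv track=rewrite | github.com/le-c-a-c-a/projet-trop-cool | main.py | calculer_positions_molecule
-- ===== SOURCE A (Python) =====
-- ZONE_MOLECULE_HAUT = 230
--
-- def calculer_positions_molecule(molecule_affichee: list) -> list:  # Axel
--     """Calcule les positions des atomes pour un affichage en zigzag sur plusieurs lignes."""
--     marge_x = 140
--     marge_y = ZONE_MOLECULE_HAUT - 10
--     espace_x = 95
--     espace_y = 190
--     decalage_y = 40
--     max_par_ligne = 10
--     positions = []
--
--     for i in range(len(molecule_affichee)):
--         ligne = i // max_par_ligne
--         colonne = i % max_par_ligne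
--
--         if ligne % 2 == 0:
--             colonne_affichage = colonne
--         else:
--             colonne_affichage = max_par_ligne - 1 - colonne
--
--         position_x = marge_x + colonne_affichage * espace_x
--         position_y = marge_y + ligne * espace_y
--
--         if colonne % 2 == 0:
--             position_y -= decalage_y
--         else:
--             position_y += decalage_y
--
--         positions.append((position_x, position_y))
--
--     return positions
-- ===== SOURCE B (Python) =====
-- ZONE_MOLECULE_HAUT = 230
--
-- def calculer_positions_molecule(molecule_affichee: list) -> list:  # row-by-row rewrite
--     """Zigzag positions: outer loop over lines, inner loop over the 10 column slots."""
--     marge_x = 140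
--     marge_y = ZONE_MOLECULE_HAUT - 10
--     espace_x = 95
--     espace_y = 190
--     decalage_y = 40
--     max_par_ligne = 10
--
--     n = len(molecule_affichee)
--     positions = []
--     ligne = 0
--     while len(positions) < n:
--         base_y = marge_y + ligne * espace_y
--         if ligne % 2 == 0:
--             colonnes_affichage = range(max_par_ligne)
--         else:
--             colonnes_affichage = range(max_par_ligne - 1, -1, -1)
--         for col in colonnes_affichage:
--             if len(positions) == n:
--                 break
--             vraie_colonne = col if ligne % 2 == 0 else max_par_ligne - 1 - col
--             if vraie_colonne % 2 == 0:
--                 y = base_y - decalage_y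
--             else:
--                 y = base_y + decalage_y
--             positions.append((marge_x + col * espace_x, y))
--         ligne += 1
--     return positions
-- ===== Notes on version B (the rewrite author's own statement) =====
-- stated objective: alternative
-- what changed: Replaced the single flat loop over atom indices (computing line/column by // and % per atom) with an outer while-loop over lines and an inner loop over the 10 display-column slots (reversed on odd lines), keeping a running count and stopping on the partial last line.
import Mathlib
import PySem

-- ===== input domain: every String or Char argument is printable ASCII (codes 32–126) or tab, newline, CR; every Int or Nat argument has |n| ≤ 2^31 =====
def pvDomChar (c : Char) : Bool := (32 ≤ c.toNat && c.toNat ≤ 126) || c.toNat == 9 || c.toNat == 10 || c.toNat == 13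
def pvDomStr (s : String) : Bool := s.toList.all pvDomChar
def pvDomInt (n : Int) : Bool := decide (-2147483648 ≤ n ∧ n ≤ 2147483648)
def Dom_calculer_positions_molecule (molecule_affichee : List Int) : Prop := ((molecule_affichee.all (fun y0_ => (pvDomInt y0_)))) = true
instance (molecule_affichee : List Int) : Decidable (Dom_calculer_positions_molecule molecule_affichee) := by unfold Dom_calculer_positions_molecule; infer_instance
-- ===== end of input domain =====

-- B replaces A's flat index loop by an outer loop over lines with an inner loop over the
-- 10 display-column slots (reversed on odd lines); alternative decomposition, same cost.


-- ===== PORT A =====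
-- literal transliteration of A: for i in range(len): ligne = i//10, colonne = i%10, append
def calculer_positions_molecule (molecule_affichee : List Int) : List (Int × Int) :=
  (PySem.List.pyRange 0 (molecule_affichee.length : Int) 1).foldl
    (fun positions i =>
      let ligne := PySem.Int.floordiv i 10
      let colonne := PySem.Int.mod i 10
      let colonne_affichage := if PySem.Int.mod ligne 2 = 0 then colonne else 10 - 1 - colonne
      let position_x := 140 + colonne_affichage * 95
      let position_y0 := (230 - 10) + ligne * 190
      let position_y := if PySem.Int.mod colonne 2 = 0 then position_y0 - 40 else position_y0 + 40
      positions ++ [(position_x, position_y)]) []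

-- ===== PORT B =====
-- inner for-loop of Source B: over the display-column slots of one line, break when n atoms placed
def pvLigneB (n : Nat) (ligne : Int) (cols : List Int) (positions : List (Int × Int)) :
    List (Int × Int) :=
  match cols with
  | [] => positions
  | col :: rest =>
    if positions.length = n then positions
    else
      let vraie_colonne := if PySem.Int.mod ligne 2 = 0 then col else 10 - 1 - col
      let base_y := (230 - 10) + ligne * 190
      let y := if PySem.Int.mod vraie_colonne 2 = 0 then base_y - 40 else base_y + 40
      pvLigneB n ligne rest (positions ++ [(140 + col * 95, y)])

-- outer while-loop of Source B (fuel only makes the while total; n passes always suffice)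
def pvBoucleB (fuel : Nat) (n : Nat) (ligne : Int) (positions : List (Int × Int)) :
    List (Int × Int) :=
  match fuel with
  | 0 => positions
  | fuel' + 1 =>
    if positions.length < n then
      let cols := if PySem.Int.mod ligne 2 = 0 then PySem.List.pyRange 0 10 1
                  else PySem.List.pyRange (10 - 1) (-1) (-1)
      pvBoucleB fuel' n (ligne + 1) (pvLigneB n ligne cols positions)
    else positions

def calculer_positions_molecule_alt (molecule_affichee : List Int) : List (Int × Int) :=
  pvBoucleB molecule_affichee.length molecule_affichee.length 0 []

-- ===== PRECONDITION & SPEC =====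
def Spec_calculer_positions_molecule (molecule_affichee : List Int) (out : List (Int × Int)) : Prop := out = calculer_positions_molecule_alt molecule_affichee
instance (molecule_affichee : List Int) (out : List (Int × Int)) : Decidable (Spec_calculer_positions_molecule molecule_affichee out) := by unfold Spec_calculer_positions_molecule; infer_instance

-- ===== CLAIM (what is proved, stated in full; the proofs are below) =====
def Claim_equal_calculer_positions_molecule : Prop := ∀ (molecule_affichee : List Int), Dom_calculer_positions_molecule molecule_affichee → Spec_calculer_positions_molecule molecule_affichee (calculer_positions_molecule molecule_affichee)

-- ===== LEMMAS AND PROOFS =====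

-- common closed form: position of atom number i
def pvPos (i : Nat) : Int × Int :=
  let L := i / 10
  let c := i % 10
  ((if L % 2 = 0 then 140 + (c : Int) * 95 else 140 + (9 - (c : Int)) * 95),
   220 + (L : Int) * 190 + (if c % 2 = 0 then -40 else 40))


-- per-atom value computed by the inner loop of B for a given line
def pvF (ligne : Int) (col : Int) : Int × Int :=
  let vraie_colonne := if PySem.Int.mod ligne 2 = 0 then col else 10 - 1 - col
  let base_y := (230 - 10) + ligne * 190
  (140 + col * 95, if PySem.Int.mod vraie_colonne 2 = 0 then base_y - 40 else base_y + 40)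

theorem pvMod2 (a : Nat) : PySem.Int.mod (a : Int) 2 = ((a % 2 : Nat) : Int) := by
  exact_mod_cast PySem.Int.mod_natCast a 2

theorem pvA_step (k : Nat) :
    (let ligne := PySem.Int.floordiv ((0:Int) + k) 10
     let colonne := PySem.Int.mod ((0:Int) + k) 10
     let colonne_affichage := if PySem.Int.mod ligne 2 = 0 then colonne else 10 - 1 - colonne
     let position_x := 140 + colonne_affichage * 95
     let position_y0 := ((230:Int) - 10) + ligne * 190
     let position_y := if PySem.Int.mod colonne 2 = 0 then position_y0 - 40 else position_y0 + 40
     ((position_x, position_y) : Int × Int)) = pvPos k := by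
  have h1 : PySem.Int.floordiv ((0:Int) + k) 10 = ((k / 10 : Nat) : Int) := by
    rw [zero_add]; exact_mod_cast PySem.Int.floordiv_natCast k 10
  have h2 : PySem.Int.mod ((0:Int) + k) 10 = ((k % 10 : Nat) : Int) := by
    rw [zero_add]; exact_mod_cast PySem.Int.mod_natCast k 10
  have h3 : PySem.Int.mod ((k / 10 : Nat) : Int) 2 = ((k / 10 % 2 : Nat) : Int) := by
    exact_mod_cast PySem.Int.mod_natCast (k / 10) 2
  have h4 : PySem.Int.mod ((k % 10 : Nat) : Int) 2 = ((k % 10 % 2 : Nat) : Int) := by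
    exact_mod_cast PySem.Int.mod_natCast (k % 10) 2
  simp only [h1, h2, h3, h4, pvPos, Nat.cast_eq_zero]
  split_ifs with hL hc hc <;>
    (refine Prod.ext ?_ ?_ <;> simp <;> omega)

theorem pvA_eq (m : List Int) :
    calculer_positions_molecule m = (List.range m.length).map pvPos := by
  unfold calculer_positions_molecule
  rw [PySem.List.foldl_append_singleton_eq_map, PySem.List.pyRange_one]
  simp only [List.map_map, List.nil_append, Int.sub_zero, Int.toNat_natCast]
  exact List.map_congr_left (fun k _ => pvA_step k)

-- inner loop: appends one position per remaining column slot until n atoms are placed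
theorem pvLigneB_eq (n : Nat) (ligne : Int) (cols : List Int) (ps : List (Int × Int))
    (h : ps.length ≤ n) :
    pvLigneB n ligne cols ps = ps ++ (cols.take (n - ps.length)).map (pvF ligne) := by
  induction cols generalizing ps with
  | nil => simp [pvLigneB]
  | cons c rest ih =>
    by_cases hc : ps.length = n
    · have : n - ps.length = 0 := by omega
      simp [pvLigneB, hc]
    · have hlt : ps.length < n := lt_of_le_of_ne h hc
      have hstep : n - ps.length = (n - (ps.length + 1)) + 1 := by omega
      simp only [pvLigneB, if_neg hc]
      rw [ih (ps ++ [(140 + c * 95, _)]) (by simp; omega)]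
      simp only [List.length_append, List.length_cons, List.length_nil, Nat.zero_add]
      rw [hstep, List.take_succ_cons]
      simp [pvF, List.append_assoc]

-- one slot of an even line: display column j is atom 10*L+j
theorem pvStepEven (L j : Nat) (hL : L % 2 = 0) (hj : j < 10) :
    pvF (L : Int) (j : Int) = pvPos (10 * L + j) := by
  have hdiv : (10 * L + j) / 10 = L := by omega
  have hmod : (10 * L + j) % 10 = j := by omega
  have e1 : PySem.Int.mod (L : Int) 2 = 0 := by rw [pvMod2, hL]; rfl
  have e2 : PySem.Int.mod (j : Int) 2 = ((j % 2 : Nat) : Int) := pvMod2 j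
  simp only [pvF, pvPos, hdiv, hmod]
  rw [if_pos e1, e2, if_pos hL]
  by_cases hj2 : j % 2 = 0
  · rw [if_pos (by rw [hj2]; rfl), if_pos hj2]
    refine Prod.ext rfl ?_; omega
  · rw [if_neg (by simp only [Nat.cast_eq_zero]; exact hj2), if_neg hj2]
    refine Prod.ext rfl ?_; omega

-- one slot of an odd line: display column 9-j is atom 10*L+j
theorem pvStepOdd (L j : Nat) (hL : L % 2 = 1) (hj : j < 10) :
    pvF (L : Int) (9 - (j : Int)) = pvPos (10 * L + j) := by
  have hdiv : (10 * L + j) / 10 = L := by omega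
  have hmod : (10 * L + j) % 10 = j := by omega
  have e1 : ¬ PySem.Int.mod (L : Int) 2 = 0 := by rw [pvMod2, hL]; decide
  have e2 : PySem.Int.mod (j : Int) 2 = ((j % 2 : Nat) : Int) := pvMod2 j
  have hv : ((10:Int) - 1 - (9 - (j : Int))) = (j : Int) := by ring
  simp only [pvF, pvPos, hdiv, hmod]
  rw [if_neg e1, hv, e2, if_neg (by omega : ¬ L % 2 = 0)]
  by_cases hj2 : j % 2 = 0
  · rw [if_pos (by rw [hj2]; rfl), if_pos hj2]
    refine Prod.ext (by push_cast; ring) ?_; omega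
  · rw [if_neg (by simp only [Nat.cast_eq_zero]; exact hj2), if_neg hj2]
    refine Prod.ext (by push_cast; ring) ?_; omega

-- the columns of line L, truncated to k ≤ 10 slots, yield atoms 10*L .. 10*L+k-1
theorem pvKey (L k : Nat) (hk : k ≤ 10) :
    ((if PySem.Int.mod (L : Int) 2 = 0 then PySem.List.pyRange 0 10 1
      else PySem.List.pyRange (10 - 1) (-1) (-1)).take k).map (pvF (L : Int))
      = (List.range k).map (fun j => pvPos (10 * L + j)) := by
  have hpar : (PySem.Int.mod (L : Int) 2 = 0) ↔ L % 2 = 0 := by rw [pvMod2 L]; omega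
  by_cases hL : L % 2 = 0
  · rw [if_pos (hpar.mpr hL), PySem.List.pyRange_one]
    simp only [Int.sub_zero]
    rw [show ((10:Int).toNat) = 10 from rfl, ← List.map_take, List.take_range,
      Nat.min_eq_left hk, List.map_map]
    refine List.map_congr_left (fun j hj => ?_)
    have hj10 : j < 10 := lt_of_lt_of_le (List.mem_range.mp hj) hk
    simpa using pvStepEven L j hL hj10
  · rw [if_neg (fun h => hL (hpar.mp h)), PySem.List.pyRange_neg_one]
    rw [show (((10:Int) - 1 - -1).toNat) = 10 from rfl, ← List.map_take, List.take_range,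
      Nat.min_eq_left hk, List.map_map]
    refine List.map_congr_left (fun j hj => ?_)
    have hj10 : j < 10 := lt_of_lt_of_le (List.mem_range.mp hj) hk
    simpa using pvStepOdd L j (by omega) hj10

theorem pvBoucleB_done (fuel n : Nat) (ligne : Int) (ps : List (Int × Int))
    (h : ¬ ps.length < n) : pvBoucleB fuel n ligne ps = ps := by
  cases fuel <;> simp [pvBoucleB, h]

theorem pvBoucleB_eq (fuel : Nat) : ∀ (n L : Nat) (ps : List (Int × Int)),
    ps.length = 10 * L → n ≤ 10 * L + 10 * fuel →
    pvBoucleB fuel n (L : Int) ps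
      = ps ++ (List.range (n - 10 * L)).map (fun j => pvPos (10 * L + j)) := by
  induction fuel with
  | zero =>
    intro n L ps hlen hfuel
    have : n - 10 * L = 0 := by omega
    simp [pvBoucleB, this]
  | succ fuel ih =>
    intro n L ps hlen hfuel
    by_cases hlt : ps.length < n
    · have hle : ps.length ≤ n := le_of_lt hlt
      have hlen10 : (if PySem.Int.mod (L : Int) 2 = 0 then PySem.List.pyRange 0 10 1
          else PySem.List.pyRange (10 - 1) (-1) (-1)).length = 10 := by
        split_ifs <;> simp [PySem.List.length_pyRange_one, PySem.List.pyRange_neg_one]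
      simp only [pvBoucleB, if_pos hlt]
      rw [pvLigneB_eq n (L : Int) _ ps hle, hlen]
      by_cases hbig : 10 * L + 10 ≤ n
      · -- full line, recurse
        have htake : n - 10 * L = 10 + (n - (10 * (L + 1))) := by omega
        have hfull : (if PySem.Int.mod (L : Int) 2 = 0 then PySem.List.pyRange 0 10 1
            else PySem.List.pyRange (10 - 1) (-1) (-1)).take (n - 10 * L)
            = (if PySem.Int.mod (L : Int) 2 = 0 then PySem.List.pyRange 0 10 1
            else PySem.List.pyRange (10 - 1) (-1) (-1)).take 10 := by
          rw [List.take_of_length_le (by omega), List.take_of_length_le (by omega)]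
        rw [hfull, pvKey L 10 le_rfl]
        have hlen' : (ps ++ (List.range 10).map (fun j => pvPos (10 * L + j))).length
            = 10 * (L + 1) := by simp [hlen]; omega
        have hcast : (L : Int) + 1 = ((L + 1 : Nat) : Int) := by push_cast; ring
        rw [hcast, ih n (L + 1) _ hlen' (by omega)]
        rw [List.append_assoc]
        congr 1
        rw [htake, List.range_add, List.map_append, List.map_map]
        congr 1
        apply List.map_congr_left
        intro j _
        simp only [Function.comp]
        congr 1
        omega
      · -- partial last line: loop terminates after this pass
        have hk : n - 10 * L ≤ 10 := by omega
        rw [pvKey L (n - 10 * L) hk]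
        apply pvBoucleB_done
        simp [hlen]
        omega
    · have : n - 10 * L = 0 := by omega
      simp [pvBoucleB, hlt, this]

theorem pvB_eq (m : List Int) :
    calculer_positions_molecule_alt m = (List.range m.length).map pvPos := by
  unfold calculer_positions_molecule_alt
  have h := pvBoucleB_eq m.length m.length 0 [] (by simp) (by omega)
  simpa using h

-- ===== VERDICT (by name: the statement is the Claim_ definition above) =====
theorem calculer_positions_molecule_spec : Claim_equal_calculer_positions_molecule := by
  intro m _
  unfold Spec_calculer_positions_molecule
  rw [pvA_eq, pvB_eq]
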